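-- pv_equiv track=rewrite | github.com/favesther/intro-to-artificial-intelligence | python_warm_up/python_warm_up.py | double_consonants
-- ===== SOURCE A (Python) =====
-- def double_consonants(text):
--     """Return a new version of text, with all the consonants doubled.
--     For example:  "The *BIG BAD* wolf!" => "TThhe *BBIGG BBADD* wwollff!"
--     For this exercise assume the consonants are all letters OTHER
--     THAN A,E,I,O, and U (and a,e,i,o, and u).
--     Maintain the case of the characters."""
--     # add a backspace to the skipwords list
--     skip=['A','E','I','O','U','a','e','i','o','u',' ']
--     output=""
--     # import string library to exclude punctuations
--     import string
--     for i in text: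
--         if i in skip: output+=str(i)
--         elif i in string.punctuation:output+=str(i)
--         else: output+=str(i*2)
--     return output
-- ===== SOURCE B (Python) =====
-- import string
--
-- def double_consonants(text):
--     # Chunked assembly: walk the text recording only consonant positions; for each
--     # consonant emit the whole untouched chunk since the last one followed by the
--     # extra copy of the consonant, then append the tail chunk and join once.
--     skip = frozenset('AEIOUaeiou ' + string.punctuation)
--     pieces = []
--     start = 0
--     for i, c in enumerate(text):
--         if c not in skip:
--             pieces.append(text[start:i + 1])
--             pieces.append(c)
--             start = i + 1
--     pieces.append(text[start:])
--     return ''.join(pieces)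
-- ===== Notes on version B (the rewrite author's own statement) =====
-- stated objective: faster
-- what changed: Replaces A's per-character accumulating concatenation (one append decision per character) with a chunked assembly: the loop only records consonant positions, flushing the untouched slice since the previous consonant plus one extra copy of it, and the tail slice, then joins the pieces once.
import Mathlib
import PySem

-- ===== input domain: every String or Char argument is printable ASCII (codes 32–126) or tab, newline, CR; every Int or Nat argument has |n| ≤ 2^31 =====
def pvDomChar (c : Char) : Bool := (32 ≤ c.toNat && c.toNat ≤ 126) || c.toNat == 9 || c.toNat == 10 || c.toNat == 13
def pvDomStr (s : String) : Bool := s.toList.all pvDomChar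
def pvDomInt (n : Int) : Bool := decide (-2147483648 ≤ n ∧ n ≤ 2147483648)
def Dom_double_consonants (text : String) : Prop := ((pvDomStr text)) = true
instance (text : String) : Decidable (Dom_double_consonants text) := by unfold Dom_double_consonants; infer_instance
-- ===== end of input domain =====

-- B replaces A's per-character accumulating concatenation with a chunked assembly:
-- it records only consonant positions, emits the untouched slice since the previous
-- consonant plus one extra copy of the consonant, and joins once (alternative decomposition).

-- ===== PORT A =====
-- skip = ['A','E','I','O','U','a','e','i','o','u',' ']
def pvSkipA : List Char := ['A','E','I','O','U','a','e','i','o','u',' ']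
-- string.punctuation (exact ASCII constant)
def pvPunct : List Char := "!\"#$%&'()*+,-./:;<=>?@[\\]^_`{|}~".toList
-- output is a string built by concatenation; modelled as List Char, converted at the end
def double_consonants (text : String) : String :=
  String.mk (text.toList.foldl (fun output i =>
    if i ∈ pvSkipA then output ++ [i]
    else if i ∈ pvPunct then output ++ [i]
    else output ++ [i, i]) [])

-- ===== PORT B =====
-- skip = frozenset('AEIOUaeiou ' + string.punctuation)
def pvSkipSet : PySem.Set Char :=
  PySem.Set.ofList ("AEIOUaeiou ".toList ++ pvPunct)
-- loop body: on a consonant, append the slice text[start:i+1] and the extra copy of c,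
-- and move start past it; otherwise the state is unchanged
def pvStepB (cs : List Char) (st : List (List Char) × Int) (ic : Int × Char) :
    List (List Char) × Int :=
  if ic.2 ∉ pvSkipSet then
    (st.1 ++ [PySem.List.slice cs (some st.2) (some (ic.1 + 1)), [ic.2]], ic.1 + 1)
  else st
-- pieces are strings, modelled as List Char; ''.join = flatten
def double_consonants_alt (text : String) : String :=
  let cs := text.toList
  let r := (PySem.List.enumerate cs 0).foldl (pvStepB cs) ([], 0)
  String.mk ((r.1 ++ [PySem.List.slice cs (some r.2) none]).flatten)

-- ===== PRECONDITION & SPEC =====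
def Spec_double_consonants (text : String) (out : String) : Prop := out = double_consonants_alt text
instance (text : String) (out : String) : Decidable (Spec_double_consonants text out) := by unfold Spec_double_consonants; infer_instance

-- ===== CLAIM (what is proved, stated in full; the proofs are below) =====
def Claim_equal_double_consonants : Prop := ∀ (text : String), Dom_double_consonants text → Spec_double_consonants text (double_consonants text)

-- ===== LEMMAS AND PROOFS =====

-- the per-character map both programs realise
def pvF (c : Char) : List Char :=
  if c ∈ pvSkipA then [c] else if c ∈ pvPunct then [c] else [c, c]

lemma pv_skip_iff (c : Char) : c ∈ pvSkipSet ↔ c ∈ pvSkipA ∨ c ∈ pvPunct := by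
  have h : ("AEIOUaeiou ".toList ++ pvPunct : List Char) = pvSkipA ++ pvPunct := by decide
  unfold pvSkipSet
  rw [PySem.Set.mem_ofList, h, List.mem_append]

lemma pvF_of_skip {c : Char} (h : c ∈ pvSkipSet) : pvF c = [c] := by
  rcases (pv_skip_iff c).mp h with h1 | h1 <;> simp [pvF, h1]

lemma pvF_of_not_skip {c : Char} (h : c ∉ pvSkipSet) : pvF c = [c, c] := by
  rw [pv_skip_iff] at h
  push_neg at h
  simp [pvF, h.1, h.2]

lemma pv_flatMap_of_all_skip {l : List Char} (h : ∀ c ∈ l, c ∈ pvSkipSet) :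
    l.flatMap pvF = l := by
  induction l with
  | nil => rfl
  | cons x xs ih =>
      simp only [List.flatMap_cons, pvF_of_skip (h x (by simp)),
        ih (fun c hc => h c (by simp [hc]))]
      rfl

-- A's loop computes the flatMap of pvF
lemma pvA_eq_flatMap (cs : List Char) :
    cs.foldl (fun output i =>
      if i ∈ pvSkipA then output ++ [i]
      else if i ∈ pvPunct then output ++ [i]
      else output ++ [i, i]) [] = cs.flatMap pvF := by
  have hstep : cs.foldl (fun output i =>
      if i ∈ pvSkipA then output ++ [i]
      else if i ∈ pvPunct then output ++ [i]
      else output ++ [i, i]) [] =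
      cs.foldl (fun output i => output ++ pvF i) [] := by
    apply PySem.List.foldl_congr_mem
    intro acc x _
    unfold pvF
    split_ifs <;> rfl
  rw [hstep, PySem.List.foldl_append_eq_flatMap, List.nil_append]

-- B's loop invariant: processing the suffix cs.drop k with pieces ps and the last
-- consonant boundary s (all of cs[s:k] kept characters) produces the output of cs[s:]
lemma pvB_inv (cs : List Char) : ∀ (tail : List Char) (k s : Nat) (ps : List (List Char)),
    s ≤ k → tail = cs.drop k →
    (∀ c ∈ (cs.drop s).take (k - s), c ∈ pvSkipSet) →
    (((PySem.List.enumerate tail (k : Int)).foldl (pvStepB cs) (ps, (s : Int))).1 ++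
      [PySem.List.slice cs
        (some ((PySem.List.enumerate tail (k : Int)).foldl (pvStepB cs) (ps, (s : Int))).2)
        none]).flatten
    = ps.flatten ++ (cs.drop s).flatMap pvF := by
  intro tail
  induction tail with
  | nil =>
      intro k s ps hsk htail hkeep
      have hlen : cs.length ≤ k := by
        by_contra h
        push_neg at h
        have := List.drop_eq_nil_iff.mp htail.symm
        omega
      have htake : (cs.drop s).take (k - s) = cs.drop s := by
        apply List.take_of_length_le
        simp
        omega
      rw [htake] at hkeep
      simp only [PySem.List.enumerate, List.foldl_nil]
      rw [PySem.List.slice_from_natCast, List.flatten_append,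
        pv_flatMap_of_all_skip hkeep]
      simp
  | cons c tail' ih =>
      intro k s ps hsk htail hkeep
      have hget : cs[k]? = some c := by
        have : (cs.drop k)[0]? = some c := by rw [← htail]; rfl
        simpa using this
      have hklen : k < cs.length := by
        by_contra h
        push_neg at h
        rw [List.getElem?_eq_none (by omega)] at hget
        simp at hget
      have htail' : tail' = cs.drop (k + 1) := by
        have : cs.drop k = c :: tail' := htail.symm
        have h2 : (cs.drop k).tail = tail' := by rw [this]; rfl
        rw [← h2, List.tail_drop]
      rw [PySem.List.enumerate_cons]
      by_cases hc : c ∈ pvSkipSet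
      · -- kept character: state unchanged, the kept block grows by one
        have hstep : pvStepB cs (ps, (s : Int)) ((k : Int), c) = (ps, (s : Int)) := by
          simp [pvStepB, hc]
        have hcast : ((k : Int) + 1) = ((k + 1 : Nat) : Int) := by push_cast; ring
        rw [List.foldl_cons, hstep, hcast]
        apply ih (k + 1) s ps (by omega) htail'
        intro x hx
        have hlen' : k - s < (cs.drop s).length := by simp; omega
        have h2 : (cs.drop s)[k - s]? = some c := by
          rw [List.getElem?_drop]
          have h3 : s + (k - s) = k := by omega
          rw [h3, hget]
        have htake : (cs.drop s).take (k + 1 - s) =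
            (cs.drop s).take (k - s) ++ [c] := by
          have h1 : k + 1 - s = (k - s) + 1 := by omega
          rw [h1, List.take_add_one, h2]
          rfl
        rw [htake] at hx
        rcases List.mem_append.mp hx with h | h
        · exact hkeep x h
        · simp at h; rw [h]; exact hc
      · -- consonant: flush the chunk cs[s:k+1] and the extra copy of c
        have hstep : pvStepB cs (ps, (s : Int)) ((k : Int), c) =
            (ps ++ [PySem.List.slice cs (some (s : Int)) (some ((k : Int) + 1)), [c]],
              (k : Int) + 1) := by
          simp [pvStepB, hc]
        have hcast : ((k : Int) + 1) = ((k + 1 : Nat) : Int) := by push_cast; ring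
        rw [List.foldl_cons, hstep, hcast]
        rw [ih (k + 1) (k + 1)
          (ps ++ [PySem.List.slice cs (some (s : Int)) (some ((k + 1 : Nat) : Int)), [c]])
          (le_refl _) htail' (by simp)]
        -- both sides are ps.flatten ++ cs[s:k] ++ [c, c] ++ output of cs[k+1:]
        rw [PySem.List.slice_natCast]
        have hkp : ∀ x ∈ (cs.drop s).take (k - s), x ∈ pvSkipSet := hkeep
        have h2 : (cs.drop s)[k - s]? = some c := by
          rw [List.getElem?_drop]
          have h3 : s + (k - s) = k := by omega
          rw [h3, hget]
        have hchunk : (cs.drop s).take (k + 1 - s) =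
            (cs.drop s).take (k - s) ++ [c] := by
          have h1 : k + 1 - s = (k - s) + 1 := by omega
          rw [h1, List.take_add_one, h2]
          rfl
        have hds : cs.drop s =
            (cs.drop s).take (k - s) ++ c :: cs.drop (k + 1) := by
          conv_lhs => rw [← List.take_append_drop (k + 1 - s) (cs.drop s)]
          rw [List.drop_drop, show s + (k + 1 - s) = k + 1 by omega, hchunk]
          simp
        rw [hchunk]
        conv_rhs => rw [hds]
        simp [List.flatMap_append, pv_flatMap_of_all_skip hkp, pvF_of_not_skip hc]

theorem double_consonants_spec : Claim_equal_double_consonants := by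
  intro text _
  unfold Spec_double_consonants double_consonants double_consonants_alt
  congr 1
  rw [pvA_eq_flatMap]
  have h := pvB_inv text.toList text.toList 0 0 [] (le_refl 0) (by simp) (by simp)
  simp only [Nat.cast_zero, List.drop_zero, List.flatten_nil, List.nil_append] at h
  exact h.symm
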